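-- pv_equiv track=rewrite | github.com/k5Lchu/battleship_python | battleship.py | select_tile
-- ===== SOURCE A (Python) =====
-- tile_dim = 40
--
-- def select_tile(pos_x,pos_y,battle_field):
-- 	#if invalid tile, return invalid board position
-- 	if pos_x < 500 or pos_x > 900:
-- 		return (-1,-1)
-- 	elif pos_y < 50 or pos_y > 450:
-- 		return (-1,-1)
--
-- 	#min tile x and y pixel coordinates
-- 	tile_x = 500
-- 	tile_y = 50
--
-- 	#board indx variables starting at 0,0
-- 	board_indx_x = board_indx_y = 0
--
-- 	#get board position of chosen tile
-- 	while tile_x < pos_x: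
-- 		if (tile_x + tile_dim) > pos_x:
-- 			break
-- 		tile_x += tile_dim
-- 		board_indx_x += 1
-- 	while tile_y < pos_y:
-- 		if (tile_y + tile_dim) > pos_y:
-- 			break
-- 		tile_y += tile_dim
-- 		board_indx_y += 1
--
-- 	return (board_indx_x,board_indx_y)
-- ===== SOURCE B (Python) =====
-- tile_dim = 40
--
-- def select_tile(pos_x, pos_y, battle_field):
--     # invalid tile -> invalid board position (same guards as A)
--     if pos_x < 500 or pos_x > 900:
--         return (-1, -1)
--     elif pos_y < 50 or pos_y > 450:
--         return (-1, -1)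
--     # closed form: count whole tile_dim steps directly
--     return ((pos_x - 500) // tile_dim, (pos_y - 50) // tile_dim)
-- ===== Notes on version B (the rewrite author's own statement) =====
-- stated objective: simpler
-- what changed: Replaces both accumulate-and-compare while-loops with closed-form integer divisions (pos_x-500)//40 and (pos_y-50)//40.
import Mathlib
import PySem

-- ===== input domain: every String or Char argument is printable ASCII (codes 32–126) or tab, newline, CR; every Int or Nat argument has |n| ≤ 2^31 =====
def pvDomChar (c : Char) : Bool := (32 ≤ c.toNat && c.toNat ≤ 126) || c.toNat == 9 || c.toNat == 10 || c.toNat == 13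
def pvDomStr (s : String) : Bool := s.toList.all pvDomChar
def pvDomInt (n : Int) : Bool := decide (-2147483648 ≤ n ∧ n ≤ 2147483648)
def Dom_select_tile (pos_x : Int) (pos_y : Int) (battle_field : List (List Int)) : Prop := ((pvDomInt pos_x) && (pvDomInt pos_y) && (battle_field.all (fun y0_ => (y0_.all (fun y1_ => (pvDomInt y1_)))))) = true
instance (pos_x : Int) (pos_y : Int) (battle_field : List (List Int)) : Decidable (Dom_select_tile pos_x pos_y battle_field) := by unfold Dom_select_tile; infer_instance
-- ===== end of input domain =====

-- B replaces A's two step-by-tile while-loops with closed-form floor divisions (simpler).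

-- ===== PORT A =====
-- the while loop: advance tile by tile_dim (40) while it stays ≤ pos, counting steps
def select_tile_loop (pos tile idx : Int) : Int :=
  if _h : tile < pos then
    if tile + 40 > pos then idx
    else select_tile_loop pos (tile + 40) (idx + 1)
  else idx
termination_by (pos - tile).toNat
decreasing_by omega

def select_tile (pos_x : Int) (pos_y : Int) (battle_field : List (List Int)) : Int × Int :=
  if pos_x < 500 ∨ pos_x > 900 then (-1, -1)
  else if pos_y < 50 ∨ pos_y > 450 then (-1, -1)
  else (select_tile_loop pos_x 500 0, select_tile_loop pos_y 50 0)

-- ===== PORT B =====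
def select_tile_alt (pos_x : Int) (pos_y : Int) (battle_field : List (List Int)) : Int × Int :=
  if pos_x < 500 ∨ pos_x > 900 then (-1, -1)
  else if pos_y < 50 ∨ pos_y > 450 then (-1, -1)
  else (PySem.Int.floordiv (pos_x - 500) 40, PySem.Int.floordiv (pos_y - 50) 40)

-- ===== PRECONDITION & SPEC =====
def Spec_select_tile (pos_x : Int) (pos_y : Int) (battle_field : List (List Int)) (out : Int × Int) : Prop := out = select_tile_alt pos_x pos_y battle_field
instance (pos_x : Int) (pos_y : Int) (battle_field : List (List Int)) (out : Int × Int) : Decidable (Spec_select_tile pos_x pos_y battle_field out) := by unfold Spec_select_tile; infer_instance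

-- ===== CLAIM (what is proved, stated in full; the proofs are below) =====
def Claim_equal_select_tile : Prop := ∀ (pos_x : Int) (pos_y : Int) (battle_field : List (List Int)), Dom_select_tile pos_x pos_y battle_field → Spec_select_tile pos_x pos_y battle_field (select_tile pos_x pos_y battle_field)

-- ===== LEMMAS AND PROOFS =====

theorem select_tile_loop_eq (pos tile idx : Int) :
    tile ≤ pos → select_tile_loop pos tile idx = idx + (pos - tile) / 40 := by
  fun_induction select_tile_loop pos tile idx with
  | case1 tile idx hlt hbr =>
    intro _
    have : (pos - tile) / 40 = 0 := by omega
    omega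
  | case2 tile idx hlt hbr ih =>
    intro _
    rw [ih (by omega)]
    omega
  | case3 tile idx hlt =>
    intro h
    have : tile = pos := by omega
    simp [this]

-- ===== VERDICT (by name: the statement is the Claim_ definition above) =====
theorem select_tile_spec : Claim_equal_select_tile := by
  intro pos_x pos_y battle_field _
  unfold Spec_select_tile select_tile select_tile_alt
  split_ifs with h1 h2
  · rfl
  · rfl
  · rw [PySem.Int.floordiv_eq_ediv_of_pos (by omega),
        PySem.Int.floordiv_eq_ediv_of_pos (by omega),
        select_tile_loop_eq pos_x 500 0 (by omega),
        select_tile_loop_eq pos_y 50 0 (by omega)]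
    simp
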